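-- pv_equiv track=rewrite | github.com/Shershah04875/ada-python-lab | permutation.py | AllPermutation
-- ===== SOURCE A (Python) =====
-- def AllPermutation(word):  # Function to compute all the possible string from three letter word
--     ans1 = []  # Declaring empty string to store all permutation of the given word
--     for i in range(len(word)):
--         for j in range(len(word)):
--             if i == j:
--                 continue  # Skipping inner k loop if i and j are pointing to the same letter of the given word
--             for k in range(len(word)):
--                 if j == k or k == i:  # skipping the current iteration of the k loop if i or j and k are pointing to the same letter
--                     continue
--                 # Appending the word in which i not equals to j nor k
--                 ans1.append(word[i]+word[j]+word[k])
--     return ans1  # Finally returning our answer which is stored in the list ans1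
-- ===== SOURCE B (Python) =====
-- def AllPermutation(word):  # breadth-wise expansion of (prefix, remaining-pool) states, three rounds
--     states = [("", list(word))]
--     for _ in range(3):
--         states = [(pre + pool[i], pool[:i] + pool[i + 1:])
--                   for pre, pool in states
--                   for i in range(len(pool))]
--     return [pre for pre, _ in states]
-- ===== Notes on version B (the rewrite author's own statement) =====
-- stated objective: alternative
-- what changed: Replaced the three index loops with i≠j≠k skip branches by an iterative breadth-wise expansion of (prefix, remaining-pool) states: one expansion step, applied three times, picks each element of the shrinking pool, so no skip tests or fixed index loops remain.
import Mathlib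
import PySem

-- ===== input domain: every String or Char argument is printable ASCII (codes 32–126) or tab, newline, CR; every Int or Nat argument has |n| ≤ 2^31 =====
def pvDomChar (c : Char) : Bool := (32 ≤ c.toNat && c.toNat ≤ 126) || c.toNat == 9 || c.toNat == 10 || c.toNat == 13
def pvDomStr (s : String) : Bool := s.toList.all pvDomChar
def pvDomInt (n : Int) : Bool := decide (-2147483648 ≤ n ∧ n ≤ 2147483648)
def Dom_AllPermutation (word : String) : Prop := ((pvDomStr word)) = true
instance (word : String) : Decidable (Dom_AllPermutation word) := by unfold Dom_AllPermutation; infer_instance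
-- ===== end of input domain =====

-- B replaces A's three index loops with i≠j≠k skip branches by an iterative breadth-wise
-- expansion of (prefix, remaining-pool) states, applied three times; same values in the
-- same order; objective: alternative (same cost, different decomposition).

-- ===== PORT A =====
-- word[i] with i ∈ range(len(word)) is always in range, so getD is exact here;
-- word[i]+word[j]+word[k] is built as the string of the three characters.
def AllPermutation (word : String) : List String :=
  let w := word.toList
  let n := w.length
  (List.range n).foldl (fun ans1 i =>
    (List.range n).foldl (fun ans1 j =>
      if i = j then ans1
      else (List.range n).foldl (fun ans1 k =>
        if j = k ∨ k = i then ans1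
        else ans1 ++ [String.ofList [w.getD i ' ', w.getD j ' ', w.getD k ' ']]) ans1) ans1) []

-- ===== PORT B =====
-- Source B's one expansion round: for each (prefix, pool) state and each pool index i,
-- emit (prefix + pool[i], pool[:i] + pool[i+1:]); prefixes are kept as List Char and
-- turned into String at the end (exact: Python string concat = list-of-char append).
-- pool[i] with i ∈ range(len(pool)) is in range, so getD is exact; pool[:i]+pool[i+1:] = eraseIdx i.
def pvStep (states : List (List Char × List Char)) : List (List Char × List Char) :=
  states.flatMap (fun st =>
    (List.range st.2.length).map (fun i => (st.1 ++ [st.2.getD i ' '], st.2.eraseIdx i)))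

def AllPermutation_alt (word : String) : List String :=
  ((List.range 3).foldl (fun st _ => pvStep st) [([], word.toList)]).map
    (fun st => String.ofList st.1)

-- ===== PRECONDITION & SPEC =====
def Spec_AllPermutation (word : String) (out : List String) : Prop := out = AllPermutation_alt word
instance (word : String) (out : List String) : Decidable (Spec_AllPermutation word out) := by unfold Spec_AllPermutation; infer_instance

-- ===== CLAIM (what is proved, stated in full; the proofs are below) =====
def Claim_equal_AllPermutation : Prop := ∀ (word : String), Dom_AllPermutation word → Spec_AllPermutation word (AllPermutation word)

-- ===== LEMMAS AND PROOFS =====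

-- the index embedding that skips position i
def pvE (i j : Nat) : Nat := if j < i then j else j + 1

-- the common index form both programs are reduced to
def pvIdx (w : List Char) : List String :=
  (List.range w.length).flatMap (fun i =>
    (List.range (w.length - 1)).flatMap (fun j =>
      (List.range (w.length - 2)).flatMap (fun k =>
        [String.ofList [w.getD i ' ', w.getD (pvE i j) ' ', w.getD (pvE i (pvE j k)) ' ']])))

theorem pvE_inj (i a b : Nat) (h : pvE i a = pvE i b) : a = b := by
  unfold pvE at h; split_ifs at h <;> omega

theorem pvFlatMap_congr {α β : Type} (l : List α) (f g : α → List β)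
    (h : ∀ x ∈ l, f x = g x) : l.flatMap f = l.flatMap g := by
  simp only [List.flatMap]
  exact congrArg List.flatten (List.map_congr_left h)

-- skipping one index of range n = reindexing range (n-1) through pvE
theorem pvSkip {β : Type} (n i : Nat) (hi : i < n) (h : Nat → List β) :
    (List.range n).flatMap (fun j => if j = i then [] else h j)
      = (List.range (n - 1)).flatMap (fun j => h (pvE i j)) := by
  obtain ⟨m, rfl⟩ : ∃ m, n = i + 1 + m := ⟨n - (i + 1), by omega⟩
  have h1 : List.range (i + 1 + m) = List.range (i + 1) ++ (List.range m).map (fun x => (i+1) + x) :=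
    List.range_add
  have h2 : List.range (i + 1) = List.range i ++ [i] := List.range_succ
  have h3 : i + 1 + m - 1 = i + m := by omega
  have h4 : List.range (i + m) = List.range i ++ (List.range m).map (fun x => i + x) :=
    List.range_add
  rw [h1, h2, h3, h4]
  simp only [List.flatMap_append, List.flatMap_map, List.flatMap_cons, List.flatMap_nil,
    if_true, List.append_nil]
  congr 1
  · apply pvFlatMap_congr
    intro x hx
    have : x < i := List.mem_range.mp hx
    rw [if_neg (by omega)]
    unfold pvE; rw [if_pos this]
  · apply pvFlatMap_congr
    intro x _
    rw [if_neg (by omega)]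
    unfold pvE; rw [if_neg (by omega)]; congr 1; omega

-- a fold whose body only appends emits the flatMap of its per-element output
theorem pvFoldl_extend {α β : Type} (F : α → List β) (g : List β → α → List β)
    (hg : ∀ a x, g a x = a ++ F x) :
    ∀ (l : List α) (acc : List β), l.foldl g acc = acc ++ l.flatMap F := by
  intro l
  induction l with
  | nil => intro acc; simp
  | cons x t ih => intro acc; simp [List.foldl_cons, hg, ih]

theorem pvA_eq_idx (w : List Char) : AllPermutation (String.ofList w) = pvIdx w := by
  unfold AllPermutation
  simp only [String.toList_ofList]
  have inner : ∀ (i j : Nat) (acc : List String),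
      (List.range w.length).foldl (fun a k => if j = k ∨ k = i then a
        else a ++ [String.ofList [w.getD i ' ', w.getD j ' ', w.getD k ' ']]) acc
      = acc ++ (List.range w.length).flatMap (fun k => if j = k ∨ k = i then []
        else [String.ofList [w.getD i ' ', w.getD j ' ', w.getD k ' ']]) :=
    fun i j acc => pvFoldl_extend _ _ (fun a k => by split <;> simp) _ acc
  have mid : ∀ (i : Nat) (acc : List String),
      (List.range w.length).foldl (fun a j => if i = j then a
        else (List.range w.length).foldl (fun a k => if j = k ∨ k = i then a
          else a ++ [String.ofList [w.getD i ' ', w.getD j ' ', w.getD k ' ']]) a) acc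
      = acc ++ (List.range w.length).flatMap (fun j => if i = j then []
        else (List.range w.length).flatMap (fun k => if j = k ∨ k = i then []
          else [String.ofList [w.getD i ' ', w.getD j ' ', w.getD k ' ']])) :=
    fun i acc => pvFoldl_extend _ _ (fun a j => by rw [inner]; split <;> simp) _ acc
  have outer := pvFoldl_extend
    (fun i => (List.range w.length).flatMap (fun j => if i = j then []
        else (List.range w.length).flatMap (fun k => if j = k ∨ k = i then []
          else [String.ofList [w.getD i ' ', w.getD j ' ', w.getD k ' ']])))
    _ (fun a i => mid i a) (List.range w.length) []
  rw [outer, List.nil_append]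
  unfold pvIdx
  apply pvFlatMap_congr
  intro i hi
  have hi' : i < w.length := List.mem_range.mp hi
  calc (List.range w.length).flatMap (fun j => if i = j then []
          else (List.range w.length).flatMap (fun k => if j = k ∨ k = i then []
            else [String.ofList [w.getD i ' ', w.getD j ' ', w.getD k ' ']]))
      = (List.range w.length).flatMap (fun j => if j = i then []
          else (List.range w.length).flatMap (fun k => if j = k ∨ k = i then []
            else [String.ofList [w.getD i ' ', w.getD j ' ', w.getD k ' ']])) := by
        apply pvFlatMap_congr; intro j _
        by_cases hij : i = j
        · simp [hij]
        · rw [if_neg hij, if_neg (fun h => hij h.symm)]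
    _ = (List.range (w.length - 1)).flatMap (fun j =>
          (List.range w.length).flatMap (fun k => if pvE i j = k ∨ k = i then []
            else [String.ofList [w.getD i ' ', w.getD (pvE i j) ' ', w.getD k ' ']])) :=
        pvSkip w.length i hi' _
    _ = (List.range (w.length - 1)).flatMap (fun j =>
          (List.range (w.length - 2)).flatMap (fun k =>
            [String.ofList [w.getD i ' ', w.getD (pvE i j) ' ', w.getD (pvE i (pvE j k)) ' ']])) := by
        apply pvFlatMap_congr
        intro j hj
        have hj' : j < w.length - 1 := List.mem_range.mp hj
        calc (List.range w.length).flatMap (fun k => if pvE i j = k ∨ k = i then []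
                else [String.ofList [w.getD i ' ', w.getD (pvE i j) ' ', w.getD k ' ']])
            = (List.range w.length).flatMap (fun k => if k = i then []
                else if pvE i j = k then []
                else [String.ofList [w.getD i ' ', w.getD (pvE i j) ' ', w.getD k ' ']]) := by
              apply pvFlatMap_congr; intro k _
              by_cases hk1 : k = i
              · simp [hk1]
              · by_cases hk2 : pvE i j = k <;> simp [hk1, hk2]
          _ = (List.range (w.length - 1)).flatMap (fun k =>
                if pvE i j = pvE i k then []
                else [String.ofList [w.getD i ' ', w.getD (pvE i j) ' ', w.getD (pvE i k) ' ']]) :=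
              pvSkip w.length i hi' _
          _ = (List.range (w.length - 1)).flatMap (fun k => if k = j then []
                else [String.ofList [w.getD i ' ', w.getD (pvE i j) ' ', w.getD (pvE i k) ' ']]) := by
              apply pvFlatMap_congr; intro k _
              by_cases h : pvE i j = pvE i k
              · rw [if_pos h, if_pos (pvE_inj i j k h).symm]
              · rw [if_neg h, if_neg (fun hk => h (by rw [hk]))]
          _ = (List.range (w.length - 1 - 1)).flatMap (fun k =>
                [String.ofList [w.getD i ' ', w.getD (pvE i j) ' ', w.getD (pvE i (pvE j k)) ' ']]) :=
              pvSkip (w.length - 1) j hj' _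
          _ = _ := by rw [Nat.sub_sub]

theorem pvGetD_eraseIdx (l : List Char) (i j : Nat) (_hi : i < l.length) :
    (l.eraseIdx i).getD j ' ' = l.getD (pvE i j) ' ' := by
  unfold pvE
  rw [List.getD_eq_getElem?_getD, List.getD_eq_getElem?_getD, List.getElem?_eraseIdx]
  split <;> rfl

theorem pvLen_eraseIdx (l : List Char) (i : Nat) (hi : i < l.length) :
    (l.eraseIdx i).length = l.length - 1 := by
  rw [List.length_eraseIdx, if_pos hi]

theorem pvFlatMap_single {α β : Type} (l : List α) (f : α → β) :
    l.flatMap (fun x => [f x]) = l.map f := by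
  induction l with
  | nil => rfl
  | cons x t ih => simp [List.flatMap_cons, ih]

theorem pvB_eq_idx (w : List Char) : AllPermutation_alt (String.ofList w) = pvIdx w := by
  unfold AllPermutation_alt
  simp only [String.toList_ofList,
    show List.range 3 = [0, 1, 2] from rfl, List.foldl_cons, List.foldl_nil]
  simp only [pvStep, List.flatMap_cons, List.flatMap_nil, List.append_nil, List.flatMap_map,
    List.map_flatMap, List.map_map, List.flatMap_assoc, List.nil_append]
  unfold pvIdx
  apply pvFlatMap_congr
  intro i hi
  have hi' : i < w.length := List.mem_range.mp hi
  rw [pvLen_eraseIdx w i hi']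
  apply pvFlatMap_congr
  intro j hj
  have hjl : j < (w.eraseIdx i).length := by
    rw [pvLen_eraseIdx w i hi']; exact List.mem_range.mp hj
  rw [pvLen_eraseIdx _ j hjl, pvLen_eraseIdx w i hi', Nat.sub_sub]
  rw [pvFlatMap_single]
  apply List.map_congr_left
  intro k _
  simp only [Function.comp]
  rw [pvGetD_eraseIdx _ j k hjl, pvGetD_eraseIdx w i (pvE j k) hi', pvGetD_eraseIdx w i j hi']
  simp

-- ===== VERDICT (by name: the statement is the Claim_ definition above) =====
theorem AllPermutation_spec : Claim_equal_AllPermutation := by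
  intro word _
  unfold Spec_AllPermutation
  rw [← String.ofList_toList (s := word), pvA_eq_idx, pvB_eq_idx]
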